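-- pv_equiv track=rewrite | github.com/ianquimot/DFA-AutomataTheory | DFAAssignment.py | automate
-- ===== SOURCE A (Python) =====
-- def automate(s):
--     if len(s)<3:
--         return "Rejected"
--
--     if s[0] == '1':
--         if s[1] == '0':
--             if s[2] == '1':
--                 for i in range(3, len(s)):
--                     if s[i] != '1':
--                         return "Rejected" #This line iterates over the characters of the input string s starting from index 3 (the fourth character) till the end. It checks if any character other than '1' is encountered in this range. If any character other than '1' is found, it returns "Rejected".
--                 return "Accepted" #If the loop completes without finding any non-'1' characters, it means that all characters beyond the third position are '1's. In this case, the function returns "Accepted", indicating that the input string satisfies the specified conditions.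
--             return "Rejected" #If the second character of the input string s is not '0', it implies that the specified condition is not met, and the function returns "Rejected".
--         return "Rejected" #If the first character of the input string s is not '1', it implies that the specified condition is not met, and the function returns "Rejected".
--
--
--     return "Rejected" #This line serves as a default return statement. If none of the previous conditions are met, it means the input string does not satisfy the specified conditions, and the function returns "Rejected".
-- ===== SOURCE B (Python) =====
-- # Table-driven DFA: one uniform pass with an explicit transition table; only q3 accepts.
-- _T = {
--     ('q0', '1'): 'q1',
--     ('q1', '0'): 'q2',
--     ('q2', '1'): 'q3',
--     ('q3', '1'): 'q3',
-- }
--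
-- def automate(s):
--     state = 'q0'
--     for ch in s:
--         state = _T.get((state, ch), 'dead')
--     return "Accepted" if state == 'q3' else "Rejected"
-- ===== Notes on version B (the rewrite author's own statement) =====
-- stated objective: idiomatic
-- what changed: Replaced the nested character conditionals plus a partial tail loop with a table-driven DFA: an explicit (state,char)->state transition dict and a single uniform scan keeping one state variable, accepting iff the final state is q3.
import Mathlib
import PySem

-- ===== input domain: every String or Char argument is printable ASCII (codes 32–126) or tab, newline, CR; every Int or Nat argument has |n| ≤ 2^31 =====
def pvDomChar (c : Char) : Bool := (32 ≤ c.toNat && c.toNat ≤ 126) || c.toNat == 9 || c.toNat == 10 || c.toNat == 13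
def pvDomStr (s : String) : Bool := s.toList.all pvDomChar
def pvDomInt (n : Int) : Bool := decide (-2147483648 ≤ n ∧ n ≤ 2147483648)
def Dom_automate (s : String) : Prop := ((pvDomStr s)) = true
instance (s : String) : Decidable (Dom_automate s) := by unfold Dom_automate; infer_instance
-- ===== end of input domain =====

-- B changes the structure only (table-driven DFA, one uniform scan); same O(n) behaviour, return value only.

-- ===== PORT A =====
-- the tail loop 'for i in range(3, len(s)): if s[i] != '1': return "Rejected"' over the remaining characters
def automateTail : List Char → String
  | [] => "Accepted"
  | c :: rest => if c ≠ '1' then "Rejected" else automateTail rest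

def automate (s : String) : String :=
  match s.toList with
  | c0 :: c1 :: c2 :: rest =>
    if c0 = '1' then
      if c1 = '0' then
        if c2 = '1' then automateTail rest
        else "Rejected"
      else "Rejected"
    else "Rejected"
  | _ => "Rejected"   -- len(s) < 3

-- ===== PORT B =====
-- the transition table _T
def pvTable : PySem.Dict (String × Char) String :=
  PySem.Dict.ofList [(("q0", '1'), "q1"), (("q1", '0'), "q2"), (("q2", '1'), "q3"), (("q3", '1'), "q3")]

def automate_alt (s : String) : String :=
  let state := s.toList.foldl (fun st ch => (pvTable.get? (st, ch)).getD "dead") "q0"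
  if state = "q3" then "Accepted" else "Rejected"

-- ===== PRECONDITION & SPEC =====
def Spec_automate (s : String) (out : String) : Prop := out = automate_alt s
instance (s : String) (out : String) : Decidable (Spec_automate s out) := by unfold Spec_automate; infer_instance

-- ===== CLAIM (what is proved, stated in full; the proofs are below) =====
def Claim_equal_automate : Prop := ∀ (s : String), Dom_automate s → Spec_automate s (automate s)

-- ===== LEMMAS AND PROOFS =====

def pvStep (st : String) (ch : Char) : String := (pvTable.get? (st, ch)).getD "dead"

theorem pvTable_mk : pvTable = PySem.Dict.mk [(("q0", '1'), "q1"), (("q1", '0'), "q2"), (("q2", '1'), "q3"), (("q3", '1'), "q3")] := by decide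

theorem pvStep_q0 (c : Char) : pvStep "q0" c = if c = '1' then "q1" else "dead" := by
  by_cases h : c = '1'
  · simp [pvStep, pvTable_mk, PySem.Dict.get?, h]
  · simp [pvStep, pvTable_mk, PySem.Dict.get?, h, Ne.symm h]

theorem pvStep_q1 (c : Char) : pvStep "q1" c = if c = '0' then "q2" else "dead" := by
  by_cases h : c = '0'
  · simp [pvStep, pvTable_mk, PySem.Dict.get?, h]
  · simp [pvStep, pvTable_mk, PySem.Dict.get?, h, Ne.symm h]

theorem pvStep_q2 (c : Char) : pvStep "q2" c = if c = '1' then "q3" else "dead" := by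
  by_cases h : c = '1'
  · simp [pvStep, pvTable_mk, PySem.Dict.get?, h]
  · simp [pvStep, pvTable_mk, PySem.Dict.get?, h, Ne.symm h]

theorem pvStep_q3 (c : Char) : pvStep "q3" c = if c = '1' then "q3" else "dead" := by
  by_cases h : c = '1'
  · simp [pvStep, pvTable_mk, PySem.Dict.get?, h]
  · simp [pvStep, pvTable_mk, PySem.Dict.get?, h, Ne.symm h]

theorem pvStep_dead (c : Char) : pvStep "dead" c = "dead" := by
  simp [pvStep, pvTable_mk, PySem.Dict.get?]

theorem foldl_dead (l : List Char) : l.foldl pvStep "dead" = "dead" := by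
  induction l with
  | nil => rfl
  | cons c r ih => simp [List.foldl, pvStep_dead, ih]

theorem automateTail_cases (l : List Char) : automateTail l = "Accepted" ∨ automateTail l = "Rejected" := by
  induction l with
  | nil => left; rfl
  | cons c r ih =>
    by_cases h : c = '1'
    · simpa [automateTail, h] using ih
    · right; simp [automateTail, h]

theorem foldl_q3 (l : List Char) :
    l.foldl pvStep "q3" = if automateTail l = "Accepted" then "q3" else "dead" := by
  induction l with
  | nil => rfl
  | cons c r ih =>
    by_cases h : c = '1'
    · simp [List.foldl, pvStep_q3, h, automateTail, ih]
    · simp [List.foldl, pvStep_q3, h, automateTail, foldl_dead]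

-- ===== VERDICT (by name: the statement is the Claim_ definition above) =====
theorem automate_spec : Claim_equal_automate := by
  intro s _
  unfold Spec_automate automate automate_alt
  show _ = if (s.toList.foldl pvStep "q0") = "q3" then "Accepted" else "Rejected"
  match hl : s.toList with
  | [] => rfl
  | [c0] =>
    by_cases h0 : c0 = '1' <;> simp [List.foldl, pvStep_q0, h0]
  | [c0, c1] =>
    by_cases h0 : c0 = '1' <;> by_cases h1 : c1 = '0' <;>
      simp [List.foldl, pvStep_q0, pvStep_q1, h0, h1, pvStep_dead]
  | c0 :: c1 :: c2 :: rest =>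
    by_cases h0 : c0 = '1' <;> by_cases h1 : c1 = '0' <;> by_cases h2 : c2 = '1' <;>
      simp [List.foldl, pvStep_q0, pvStep_q1, pvStep_q2, h0, h1, h2, pvStep_dead, foldl_dead, foldl_q3]
    rcases automateTail_cases rest with h | h <;> simp [h]
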